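-- pv_equiv track=rewrite | github.com/k2-fsa/sherpa-onnx | scripts/supertonic/convert.py | _detect_variable_axis
-- ===== SOURCE A (Python) =====
-- from typing import Dict, List, Optional, Tuple
--
-- def _detect_variable_axis(shapes: List[Tuple[int, ...]]) -> Optional[int]:
--     # return axis index if exactly one axis varies across shapes, else None
--     if not shapes:
--         return None
--     nd = len(shapes[0])
--     if any(len(s) != nd for s in shapes):
--         return None
--     var_axes = []
--     for ax in range(nd):
--         vals = {s[ax] for s in shapes}
--         if len(vals) > 1:
--             var_axes.append(ax)
--     if len(var_axes) == 1:
--         return var_axes[0]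
--     return None
-- ===== SOURCE B (Python) =====
-- from typing import List, Optional, Tuple
--
-- def _detect_variable_axis(shapes: List[Tuple[int, ...]]) -> Optional[int]:
--     # compare every shape against shapes[0]; collect the axes where any shape differs
--     if not shapes:
--         return None
--     ref = shapes[0]
--     nd = len(ref)
--     if any(len(s) != nd for s in shapes):
--         return None
--     diff_axes = set()
--     for s in shapes:
--         for ax in range(nd):
--             if s[ax] != ref[ax]:
--                 diff_axes.add(ax)
--     if len(diff_axes) == 1:
--         return next(iter(diff_axes))
--     return None
-- ===== Notes on version B (the rewrite author's own statement) =====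
-- stated objective: alternative
-- what changed: Instead of building a per-axis set of distinct values for every axis, B compares each shape once against the first shape and accumulates the single set of axis indices that ever differ.
import Mathlib
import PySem

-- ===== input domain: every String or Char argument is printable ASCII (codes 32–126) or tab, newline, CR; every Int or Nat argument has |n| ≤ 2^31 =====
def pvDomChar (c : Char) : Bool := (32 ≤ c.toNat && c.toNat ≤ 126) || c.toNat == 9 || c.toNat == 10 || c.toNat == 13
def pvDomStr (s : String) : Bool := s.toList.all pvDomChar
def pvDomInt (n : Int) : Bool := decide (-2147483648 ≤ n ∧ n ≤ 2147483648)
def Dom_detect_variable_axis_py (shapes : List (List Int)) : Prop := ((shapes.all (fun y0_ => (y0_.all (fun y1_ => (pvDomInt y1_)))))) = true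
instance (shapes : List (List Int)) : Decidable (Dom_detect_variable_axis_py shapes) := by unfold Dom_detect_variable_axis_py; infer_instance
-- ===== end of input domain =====

-- B replaces A's per-axis distinct-value sets by one pass comparing every shape to shapes[0],
-- accumulating the set of differing axis indices (objective: alternative decomposition, same cost).

-- ===== PORT A =====
-- indexing s[ax]: every reached access is in range (the length guard ensures len s = nd), so getD is exact
def detect_variable_axis_py (shapes : List (List Int)) : Option Int :=
  match shapes with
  | [] => none
  | s0 :: _ =>
    let nd := s0.length
    if shapes.any (fun s => s.length ≠ nd) then none
    else
      let var_axes : List Int := (List.range nd).foldl (fun (acc : List Int) (ax : Nat) =>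
        let vals : PySem.Set Int := PySem.Set.ofList (shapes.map (fun s => s.getD ax 0))
        if vals.length > 1 then acc ++ [Int.ofNat ax] else acc) []
      if var_axes.length = 1 then var_axes[0]? else none

-- ===== PORT B =====
def detect_variable_axis_py_alt (shapes : List (List Int)) : Option Int :=
  match shapes with
  | [] => none
  | ref :: _ =>
    let nd := ref.length
    if shapes.any (fun s => s.length ≠ nd) then none
    else
      let diff_axes : PySem.Set Int := shapes.foldl (fun (acc : PySem.Set Int) (s : List Int) =>
        (List.range nd).foldl (fun (acc2 : PySem.Set Int) (ax : Nat) =>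
          if s.getD ax 0 ≠ ref.getD ax 0 then PySem.Set.add acc2 (Int.ofNat ax) else acc2) acc)
        PySem.Set.empty
      match diff_axes with
      | [x] => some x
      | _ => none

-- ===== PRECONDITION & SPEC =====
def Spec_detect_variable_axis_py (shapes : List (List Int)) (out : Option Int) : Prop := out = detect_variable_axis_py_alt shapes
instance (shapes : List (List Int)) (out : Option Int) : Decidable (Spec_detect_variable_axis_py shapes out) := by unfold Spec_detect_variable_axis_py; infer_instance

-- ===== CLAIM (what is proved, stated in full; the proofs are below) =====
def Claim_equal_detect_variable_axis_py : Prop := ∀ (shapes : List (List Int)), Dom_detect_variable_axis_py shapes → Spec_detect_variable_axis_py shapes (detect_variable_axis_py shapes)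

-- ===== LEMMAS AND PROOFS =====

-- the set of values at one axis has more than one element iff some shape differs there from the first
theorem one_lt_length_ofList_cons {α : Type} [DecidableEq α] (a : α) (l : List α) :
    1 < (PySem.Set.ofList (a :: l)).length ↔ ∃ x ∈ l, x ≠ a := by
  constructor
  · intro h
    by_contra hno
    simp only [not_exists, not_and, not_not] at hno
    have hsub : ∀ x ∈ PySem.Set.ofList (a :: l), x = a := by
      intro x hx
      rcases List.mem_cons.1 ((PySem.Set.mem_ofList _ _).1 hx) with h2 | h2
      · exact h2
      · exact hno x h2
    have hnd := PySem.Set.nodup_ofList (a :: l)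
    match hS : PySem.Set.ofList (a :: l) with
    | [] => simp [hS] at h
    | [_] => simp [hS] at h
    | x :: y :: t =>
      rw [hS] at hsub hnd
      have hx := hsub x (by simp)
      have hy := hsub y (by simp)
      subst hx; subst hy
      simp at hnd
  · rintro ⟨x, hxl, hxa⟩
    have hxmem : x ∈ PySem.Set.ofList (a :: l) := (PySem.Set.mem_ofList _ _).2 (by simp [hxl])
    have hamem : a ∈ PySem.Set.ofList (a :: l) := (PySem.Set.mem_ofList _ _).2 (by simp)
    match hS : PySem.Set.ofList (a :: l) with
    | [] => rw [hS] at hxmem; simp at hxmem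
    | [z] =>
      rw [hS] at hxmem hamem
      simp at hxmem hamem
      exact absurd (hxmem.trans hamem.symm) hxa
    | _ :: _ :: _ => simp

-- 'out.append(f(x)) if p(x)' over a Prop test, as filter+map
theorem foldl_append_ite {α β : Type} (p : β → Prop) [DecidablePred p] (f : β → α)
    (l : List β) (acc : List α) :
    l.foldl (fun acc x => if p x then acc ++ [f x] else acc) acc
      = acc ++ (l.filter (fun x => decide (p x))).map f := by
  induction l generalizing acc with
  | nil => simp
  | cons b t ih =>
    by_cases hb : p b
    · simp [hb, ih]
    · simp [hb, ih]

-- membership in the add-if fold over axes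
theorem mem_axisFold (ref s : List Int) (l : List Nat) (acc : List Int) (x : Int) :
    x ∈ l.foldl (fun (acc2 : PySem.Set Int) (ax : Nat) =>
        if s.getD ax 0 ≠ ref.getD ax 0 then PySem.Set.add acc2 (Int.ofNat ax) else acc2) acc
      ↔ x ∈ acc ∨ ∃ ax ∈ l, x = Int.ofNat ax ∧ s.getD ax 0 ≠ ref.getD ax 0 := by
  induction l generalizing acc with
  | nil => simp
  | cons b t ih =>
    rw [List.foldl_cons]
    by_cases hb : s.getD b 0 ≠ ref.getD b 0
    · rw [if_pos hb, ih]
      simp only [PySem.Set.mem_add, List.exists_mem_cons_iff]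
      tauto
    · rw [if_neg hb, ih]
      simp only [List.exists_mem_cons_iff]
      tauto

-- membership in B's nested fold
theorem mem_diffFold (ref : List Int) (nd : Nat) (ss : List (List Int)) (acc : List Int) (x : Int) :
    x ∈ ss.foldl (fun (acc : PySem.Set Int) (s : List Int) =>
        (List.range nd).foldl (fun (acc2 : PySem.Set Int) (ax : Nat) =>
          if s.getD ax 0 ≠ ref.getD ax 0 then PySem.Set.add acc2 (Int.ofNat ax) else acc2) acc) acc
      ↔ x ∈ acc ∨ ∃ s ∈ ss, ∃ ax < nd, x = Int.ofNat ax ∧ s.getD ax 0 ≠ ref.getD ax 0 := by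
  induction ss generalizing acc with
  | nil => simp
  | cons s t ih =>
    rw [List.foldl_cons, ih]
    simp only [mem_axisFold, List.mem_range, List.exists_mem_cons_iff]
    exact or_assoc

-- the nested fold keeps the accumulator duplicate-free
theorem nodup_diffFold (ref : List Int) (nd : Nat) (ss : List (List Int)) (acc : List Int)
    (h : acc.Nodup) :
    (ss.foldl (fun (acc : PySem.Set Int) (s : List Int) =>
        (List.range nd).foldl (fun (acc2 : PySem.Set Int) (ax : Nat) =>
          if s.getD ax 0 ≠ ref.getD ax 0 then PySem.Set.add acc2 (Int.ofNat ax) else acc2) acc) acc).Nodup := by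
  induction ss generalizing acc with
  | nil => exact h
  | cons s t ih =>
    refine ih _ ?_
    have H : ∀ (l : List Nat) (acc : List Int), acc.Nodup →
        (l.foldl (fun (acc2 : PySem.Set Int) (ax : Nat) =>
          if s.getD ax 0 ≠ ref.getD ax 0 then PySem.Set.add acc2 (Int.ofNat ax) else acc2) acc).Nodup := by
      intro l
      induction l with
      | nil => exact fun _ h => h
      | cons b tl ihl =>
        intro acc hacc
        rw [List.foldl_cons]
        by_cases hb : s.getD b 0 ≠ ref.getD b 0
        · rw [if_pos hb]; exact ihl _ (PySem.Set.nodup_add _ _ hacc)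
        · rw [if_neg hb]; exact ihl _ hacc
    exact H _ _ h

theorem detect_eq (shapes : List (List Int)) :
    detect_variable_axis_py shapes = detect_variable_axis_py_alt shapes := by
  match shapes with
  | [] => rfl
  | ref :: rest =>
    unfold detect_variable_axis_py detect_variable_axis_py_alt
    simp only
    by_cases hg : ((ref :: rest).any (fun s => s.length ≠ ref.length)) = true
    · rw [if_pos hg, if_pos hg]
    · rw [if_neg hg, if_neg hg]
      set nd := ref.length with hnd
      have hvar := foldl_append_ite
        (fun ax : Nat => 1 < (PySem.Set.ofList ((ref :: rest).map (fun s => s.getD ax 0))).length)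
        (fun ax : Nat => Int.ofNat ax) (List.range nd) []
      simp only [gt_iff_lt] at hvar ⊢
      rw [hvar, List.nil_append]
      set q : Nat → Bool := fun ax =>
        decide (1 < (PySem.Set.ofList ((ref :: rest).map (fun s => s.getD ax 0))).length) with hq
      set A : List Int := ((List.range nd).filter q).map (fun ax : Nat => Int.ofNat ax) with hA
      set B : List Int := (ref :: rest).foldl (fun (acc : PySem.Set Int) (s : List Int) =>
          (List.range nd).foldl (fun (acc2 : PySem.Set Int) (ax : Nat) =>
            if s.getD ax 0 ≠ ref.getD ax 0 then PySem.Set.add acc2 (Int.ofNat ax) else acc2) acc)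
          PySem.Set.empty with hB
      -- same members
      have hmem : ∀ x, x ∈ A ↔ x ∈ B := by
        intro x
        rw [hA, hB]
        simp only [PySem.Set.empty, mem_diffFold, List.mem_map, List.mem_filter,
          List.mem_range, List.not_mem_nil, false_or]
        constructor
        · rintro ⟨ax, ⟨hlt, hp⟩, rfl⟩
          have hp' := of_decide_eq_true (hq ▸ hp)
          rw [List.map_cons] at hp'
          rcases (one_lt_length_ofList_cons _ _).1 hp' with ⟨v, hv, hvne⟩
          rcases List.mem_map.1 hv with ⟨s, hs, rfl⟩
          exact ⟨s, List.mem_cons_of_mem _ hs, ax, hlt, rfl, hvne⟩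
        · rintro ⟨s, hs, ax, hlt, rfl, hne⟩
          refine ⟨ax, ⟨hlt, ?_⟩, rfl⟩
          rw [hq]
          apply decide_eq_true
          rw [List.map_cons]
          apply (one_lt_length_ofList_cons _ _).2
          rcases List.mem_cons.1 hs with rfl | hs
          · exact absurd rfl hne
          · exact ⟨s.getD ax 0, List.mem_map.2 ⟨s, hs, rfl⟩, hne⟩
      -- both Nodup, so same members give the same length
      have hAnd : A.Nodup := by
        rw [hA]
        exact (List.nodup_range.filter _).map (fun a b h => Int.ofNat.inj h)
      have hBnd : B.Nodup := nodup_diffFold _ _ _ _ List.nodup_nil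
      have hlen : A.length = B.length :=
        ((List.perm_ext_iff_of_nodup hAnd hBnd).2 hmem).length_eq
      by_cases h1 : A.length = 1
      · rcases List.length_eq_one_iff.1 h1 with ⟨a, ha⟩
        rcases List.length_eq_one_iff.1 (hlen ▸ h1) with ⟨b, hb⟩
        have hab : a = b := by
          have := (hmem a).1 (by simp [ha])
          rw [hb] at this; simpa using this
        rw [h1, if_pos rfl, ha, hb, hab]
        rfl
      · rw [if_neg h1]
        have h1' : ¬ B.length = 1 := fun h => h1 (hlen ▸ h)
        match hBv : B with
        | [] => rfl
        | [b] => simp at h1'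
        | _ :: _ :: _ => rfl

-- ===== VERDICT (by name: the statement is the Claim_ definition above) =====
theorem detect_variable_axis_py_spec : Claim_equal_detect_variable_axis_py := by
  intro shapes _
  exact detect_eq shapes
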